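-- pv_equiv track=rewrite | github.com/bebing93/transalign | TransAlign/utils.py | build_alignment_mapping
-- ===== SOURCE A (Python) =====
-- from typing import List, Dict, Tuple
-- from collections import defaultdict
--
-- def build_alignment_mapping(
--     alignment_line: List[List[int]], inverse=False
-- ) -> Dict[int, List[int]]:
--     """Build source-to-target alignment mapping.
--
--     Args:
--         alignment_line: List of [source_idx, target_idx] pairs
--         inverse: If true, maps from target idx to source idx else vice-versa
--
--     Returns:
--         Dictionary mapping source indices to sorted target indices
--     """
--     from2to = defaultdict(list)
--     for src_idx, trg_idx in alignment_line:
--         if inverse: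
--             from2to[trg_idx].append(src_idx)
--         else:
--             from2to[src_idx].append(trg_idx)
--
--     return {k: sorted(v) for k, v in from2to.items()}
-- ===== SOURCE B (Python) =====
-- def build_alignment_mapping(alignment_line, inverse=False):
--     """Per-key scan: for each key at its first appearance, build its whole
--     sorted value list with one comprehension over the input (no defaultdict,
--     no per-group append loop)."""
--     result = {}
--     for pair in alignment_line:
--         k = pair[1] if inverse else pair[0]
--         if k not in result:
--             result[k] = sorted(
--                 (q[0] if inverse else q[1])
--                 for q in alignment_line
--                 if (q[1] if inverse else q[0]) == k
--             )
--     return result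
-- ===== Notes on version B (the rewrite author's own statement) =====
-- stated objective: alternative
-- what changed: Replaces A's single-pass defaultdict grouping followed by a per-group sort of every collected list with a per-distinct-key scheme: at each key's first appearance one comprehension over the whole input gathers and sorts that key's value list, so no intermediate grouped dict is ever built.
import Mathlib
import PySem

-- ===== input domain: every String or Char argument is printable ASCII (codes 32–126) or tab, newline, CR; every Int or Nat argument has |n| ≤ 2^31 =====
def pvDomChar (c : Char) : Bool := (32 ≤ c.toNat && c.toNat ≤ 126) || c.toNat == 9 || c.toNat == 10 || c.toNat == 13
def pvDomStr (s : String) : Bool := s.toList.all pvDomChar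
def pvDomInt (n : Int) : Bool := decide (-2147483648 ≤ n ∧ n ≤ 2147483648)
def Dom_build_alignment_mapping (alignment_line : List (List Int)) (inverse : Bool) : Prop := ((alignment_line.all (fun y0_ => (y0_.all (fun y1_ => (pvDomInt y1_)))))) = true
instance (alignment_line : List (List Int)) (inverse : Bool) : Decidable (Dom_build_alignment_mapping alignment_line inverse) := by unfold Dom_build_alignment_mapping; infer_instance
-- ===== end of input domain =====

-- B replaces the defaultdict grouping + per-group sort with a per-distinct-key
-- comprehension scan; A = B is proved on inputs whose pairs all have length 2.

-- ===== PORT A =====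
-- 'for src_idx, trg_idx in alignment_line: from2to[key].append(val)' (defaultdict(list))
def bamStepA (inverse : Bool) (d : PySem.Dict Int (List Int)) (pair : List Int) : PySem.Dict Int (List Int) :=
  match pair with
  | [src, trg] =>
      if inverse then d.modify trg [] (· ++ [src]) else d.modify src [] (· ++ [trg])
  | _ => d  -- unreachable under Pre_ (Python raises on unpacking here)

def build_alignment_mapping (alignment_line : List (List Int)) (inverse : Bool) : List (Int × List Int) :=
  let from2to := alignment_line.foldl (bamStepA inverse) PySem.Dict.empty
  -- {k: sorted(v) for k, v in from2to.items()}
  from2to.items.map (fun kv => (kv.1, PySem.List.sorted kv.2 (fun x => x) false))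

-- ===== PORT B =====
-- 'pair[1] if inverse else pair[0]' (the grouping key) and its value twin
def bamKey (inverse : Bool) (p : List Int) : Int :=
  match p with
  | a :: b :: _ => if inverse then b else a
  | _ => 0  -- unreachable under Pre_ (IndexError)

def bamVal (inverse : Bool) (p : List Int) : Int :=
  match p with
  | a :: b :: _ => if inverse then a else b
  | _ => 0  -- unreachable under Pre_ (IndexError)

-- 'sorted((q[0] if inverse else q[1]) for q in alignment_line if (q[1] if inverse else q[0]) == k)'
def bamGroup (alignment_line : List (List Int)) (inverse : Bool) (k : Int) : List Int :=
  PySem.List.sorted ((alignment_line.filter (fun q => bamKey inverse q == k)).map (bamVal inverse)) (fun x => x) false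

def build_alignment_mapping_alt (alignment_line : List (List Int)) (inverse : Bool) : List (Int × List Int) :=
  (alignment_line.foldl
    (fun (d : PySem.Dict Int (List Int)) p =>
      let k := bamKey inverse p
      if d.contains k then d else d.insert k (bamGroup alignment_line inverse k))
    PySem.Dict.empty).items

-- ===== PRECONDITION & SPEC =====
-- Pre_ excludes pairs whose length is not 2: Python A raises ValueError unpacking them.
def Pre_build_alignment_mapping (alignment_line : List (List Int)) (inverse : Bool) : Prop :=
  ∀ p ∈ alignment_line, p.length = 2
instance (alignment_line : List (List Int)) (inverse : Bool) : Decidable (Pre_build_alignment_mapping alignment_line inverse) := by unfold Pre_build_alignment_mapping; infer_instance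

def pvWitness_build_alignment_mapping : List (List Int) × Bool := ([[0, 1], [2, 3], [0, 0]], false)

def Spec_build_alignment_mapping (alignment_line : List (List Int)) (inverse : Bool) (out : List (Int × List Int)) : Prop := out = build_alignment_mapping_alt alignment_line inverse
instance (alignment_line : List (List Int)) (inverse : Bool) (out : List (Int × List Int)) : Decidable (Spec_build_alignment_mapping alignment_line inverse out) := by unfold Spec_build_alignment_mapping; infer_instance

-- ===== CLAIM (what is proved, stated in full; the proofs are below) =====
def Claim_equal_build_alignment_mapping : Prop := ∀ (alignment_line : List (List Int)) (inverse : Bool), Dom_build_alignment_mapping alignment_line inverse → Pre_build_alignment_mapping alignment_line inverse → Spec_build_alignment_mapping alignment_line inverse (build_alignment_mapping alignment_line inverse)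

-- ===== LEMMAS AND PROOFS =====

-- A's grouped dict, characterised: keys in first-appearance order, value = that key's values in input order.
lemma A_char (al : List (List Int)) (inv : Bool) (hpre : ∀ p ∈ al, p.length = 2) :
    build_alignment_mapping al inv
      = (PySem.Set.ofList (al.map (bamKey inv))).map (fun k => (k, bamGroup al inv k)) := by
  unfold build_alignment_mapping
  have h1 : al.foldl (bamStepA inv) PySem.Dict.empty
      = al.foldl (fun d p => PySem.Dict.modify d (bamKey inv p) [] (· ++ [bamVal inv p])) PySem.Dict.empty := by
    apply PySem.List.foldl_congr_mem
    intro d p hp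
    have h2 := hpre p hp
    match p, h2 with
    | [a, b], _ => cases inv <;> simp [bamStepA, bamKey, bamVal]
  rw [h1]
  set d := al.foldl (fun d p => PySem.Dict.modify d (bamKey inv p) [] (· ++ [bamVal inv p])) PySem.Dict.empty with hd
  have hnd : d.keys.Nodup := by
    rw [hd]
    exact PySem.Dict.nodup_keys_foldl_modify_key al (bamKey inv) [] (fun d p => (· ++ [bamVal inv p])) PySem.Dict.empty PySem.Dict.nodup_keys_empty
  have hkeys : d.keys = PySem.Set.ofList (al.map (bamKey inv)) := by
    rw [hd, PySem.Dict.keys_foldl_modify_key, PySem.Dict.keys_empty, PySem.Set.update_nil_left]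
  have hget : ∀ k, d.getD k [] = (al.filter (fun q => bamKey inv q == k)).map (bamVal inv) := by
    intro k
    have : d = (al.map (fun p => (bamKey inv p, bamVal inv p))).foldl
        (fun d q => PySem.Dict.modify d q.1 [] (· ++ [q.2])) PySem.Dict.empty := by
      rw [hd, List.foldl_map]
    rw [this, PySem.Dict.getD_foldl_modify_append, PySem.Dict.getD_empty]
    simp [List.filter_map, List.map_map, Function.comp_def]
  show d.items.map (fun kv => (kv.1, PySem.List.sorted kv.2 (fun x => x) false)) = _
  rw [PySem.Dict.items_eq_map_keys d hnd [], hkeys, List.map_map]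
  apply List.map_congr_left
  intro k _
  simp [hget k, bamGroup]

-- B's loop invariant: the accumulator always holds (k, bamGroup k) for the keys seen so far.
lemma B_inv (al : List (List Int)) (inv : Bool) :
    ∀ (l : List (List Int)) (d : PySem.Dict Int (List Int)) (seen : List Int),
      d.items = seen.map (fun k => (k, bamGroup al inv k)) →
      (l.foldl (fun (d : PySem.Dict Int (List Int)) p =>
          let k := bamKey inv p
          if d.contains k then d else d.insert k (bamGroup al inv k)) d).items
        = (PySem.Set.update seen (l.map (bamKey inv))).map (fun k => (k, bamGroup al inv k)) := by
  intro l
  induction l with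
  | nil => intro d seen h; simpa [PySem.Set.update] using h
  | cons p l ih =>
      intro d seen h
      have hkeys : d.keys = seen := by
        simp [PySem.Dict.keys, h, List.map_map, Function.comp_def]
      have hcont : d.contains (bamKey inv p) = decide (bamKey inv p ∈ seen) := by
        rw [PySem.Dict.contains_eq_decide_mem_keys, hkeys]
      by_cases hmem : bamKey inv p ∈ seen
      · simp only [List.foldl_cons, List.map_cons, PySem.Set.update_cons,
          PySem.Set.add_of_mem hmem, hcont, hmem, decide_true, if_true]
        exact ih d seen h
      · simp only [List.foldl_cons, List.map_cons, PySem.Set.update_cons,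
          PySem.Set.add_of_not_mem hmem, hcont, hmem, decide_false]
        apply ih
        rw [if_neg (by simp), PySem.Dict.items_insert_of_not_contains]
        · rw [h]; simp
        · rw [hcont]; simp [hmem]

lemma B_char (al : List (List Int)) (inv : Bool) :
    build_alignment_mapping_alt al inv
      = (PySem.Set.ofList (al.map (bamKey inv))).map (fun k => (k, bamGroup al inv k)) := by
  unfold build_alignment_mapping_alt
  have := B_inv al inv al PySem.Dict.empty [] (by simp [PySem.Dict.empty])
  simpa [PySem.Set.update_nil_left] using this

-- ===== VERDICT (by name: the statement is the Claim_ definition above) =====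
theorem build_alignment_mapping_spec : Claim_equal_build_alignment_mapping := by
  intro al inv _ hpre
  show build_alignment_mapping al inv = build_alignment_mapping_alt al inv
  rw [A_char al inv hpre, B_char al inv]
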